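-- pv_equiv track=rewrite | github.com/rafacasa/leetcode-solutions | daily_25_06_07_problem_3170.py | clearStars
-- ===== SOURCE A (Python) =====
-- import string
-- from collections import deque
--
-- def clearStars(s: str) -> str:
--     cnt_letters = {a: deque() for a in string.ascii_lowercase}
--     ans = list(s)
--     for i, letter in enumerate(s):
--         if letter == "*":
--             for find_letter in string.ascii_lowercase:
--                 if cnt_letters[find_letter]:
--                     ans[cnt_letters[find_letter].pop()] = "*"
--                     break
--         else:
--             cnt_letters[letter].append(i)
--
--     return "".join(c for c in ans if c != "*")
-- ===== SOURCE B (Python) =====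
-- def clearStars(s: str) -> str:
--     # One sorted list of (letter, -index): its head is always the smallest
--     # letter with the latest index, replacing 26 per-letter stacks + alphabet scan.
--     avail = []  # kept sorted ascending
--     ans = list(s)
--     for i, c in enumerate(s):
--         if c == "*":
--             if avail:
--                 _, negi = avail.pop(0)
--                 ans[-negi] = "*"
--         else:
--             item = (c, -i)
--             k = 0
--             while k < len(avail) and avail[k] < item:
--                 k += 1
--             avail.insert(k, item)
--     return "".join(ch for ch in ans if ch != "*")
-- ===== Notes on version B (the rewrite author's own statement) =====
-- stated objective: alternative
-- what changed: B replaces A's 26 per-letter deques plus an alphabet scan per star with a single sorted list of (letter, -index) pairs whose head is always the smallest letter with the latest index.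
import Mathlib
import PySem

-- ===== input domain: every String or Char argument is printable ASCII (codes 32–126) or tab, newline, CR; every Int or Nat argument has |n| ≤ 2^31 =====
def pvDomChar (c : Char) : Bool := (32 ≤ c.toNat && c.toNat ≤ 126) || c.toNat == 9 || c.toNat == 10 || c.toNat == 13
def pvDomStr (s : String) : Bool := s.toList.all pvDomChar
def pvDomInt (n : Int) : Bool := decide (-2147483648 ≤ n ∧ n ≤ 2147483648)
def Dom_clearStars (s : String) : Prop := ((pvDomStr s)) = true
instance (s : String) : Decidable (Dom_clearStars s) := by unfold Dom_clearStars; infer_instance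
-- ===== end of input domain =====

-- B replaces A's 26 per-letter deques + alphabet scan per star with one sorted list of
-- (letter, -index) pairs; same cost class, alternative data structure (not claimed faster).

-- ===== PORT A =====
-- string.ascii_lowercase
def alphaList : List Char := "abcdefghijklmnopqrstuvwxyz".toList

-- ans[i] = v; indices reaching this in either port are always in range (they come from
-- enumerate), so the clamp of List.set is unreachable; negative-index branch kept for shape.
def pySet (xs : List Char) (i : Int) (v : Char) : List Char :=
  xs.set (if i < 0 then i + (xs.length : Int) else i).toNat v

-- A's inner 'for find_letter in string.ascii_lowercase: …; break' loop
def innerA : List Char → PySem.Dict Char (List Int) → List Char →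
    PySem.Dict Char (List Int) × List Char
  | [], cnt, ans => (cnt, ans)
  | c :: rest, cnt, ans =>
    match cnt.getD c [] with
    | [] => innerA rest cnt ans
    | j :: js =>
      (cnt.insert c ((j :: js).dropLast),
       pySet ans ((j :: js).getLast (List.cons_ne_nil j js)) '*')

-- one iteration of A's main loop; the letter branch is cnt_letters[letter].append(i)
-- (exact under Pre_; outside Pre_ Python raises KeyError there)
def stepA (st : PySem.Dict Char (List Int) × List Char) (p : Int × Char) :
    PySem.Dict Char (List Int) × List Char :=
  if p.2 = '*' then innerA alphaList st.1 st.2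
  else (st.1.insert p.2 (st.1.getD p.2 [] ++ [p.1]), st.2)

def clearStars (s : String) : String :=
  let cnt0 := alphaList.foldl (fun d c => d.insert c ([] : List Int)) PySem.Dict.empty
  let st := (PySem.List.enumerate s.toList).foldl stepA (cnt0, s.toList)
  String.ofList (st.2.filter (fun c => c != '*'))

-- ===== PORT B =====
-- Python tuple comparison (c1, n1) < (c2, n2), lexicographic
def tupLt (x y : Char × Int) : Bool := x.1 < y.1 || (x.1 == y.1 && x.2 < y.2)

-- B's while-loop + list.insert: ordered insertion keeping avail sorted
def insertS (x : Char × Int) : List (Char × Int) → List (Char × Int)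
  | [] => [x]
  | y :: ys => if tupLt y x then y :: insertS x ys else x :: y :: ys

def stepB (st : List (Char × Int) × List Char) (p : Int × Char) :
    List (Char × Int) × List Char :=
  if p.2 = '*' then
    match st.1 with
    | [] => st
    | (_, negi) :: rest => (rest, pySet st.2 (-negi) '*')
  else (insertS (p.2, -p.1) st.1, st.2)

def clearStars_alt (s : String) : String :=
  let st := (PySem.List.enumerate s.toList).foldl stepB ([], s.toList)
  String.ofList (st.2.filter (fun c => c != '*'))

-- ===== PRECONDITION & SPEC =====
-- Pre_ is exactly where A returns: any character that is neither a star nor a lowercase ascii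
-- letter makes A raise KeyError (cnt_letters has only lowercase keys).
def pvLowerOrStar (c : Char) : Bool := c == '*' || (97 ≤ c.toNat && c.toNat ≤ 122)
def Pre_clearStars (s : String) : Prop := (s.toList.all pvLowerOrStar) = true
instance (s : String) : Decidable (Pre_clearStars s) := by unfold Pre_clearStars; infer_instance

def pvWitness_clearStars : String := "aab*bc**za*"

def Spec_clearStars (s : String) (out : String) : Prop := out = clearStars_alt s
instance (s : String) (out : String) : Decidable (Spec_clearStars s out) := by
  unfold Spec_clearStars; infer_instance

-- ===== CLAIM (what is proved, stated in full; the proofs are below) =====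
def Claim_equal_clearStars : Prop :=
  ∀ (s : String), Dom_clearStars s → Pre_clearStars s → Spec_clearStars s (clearStars s)

-- ===== LEMMAS AND PROOFS =====

-- the multiset A keeps in its 26 deques, flattened in B's sorted order
def repC (L : List Char) (cnt : PySem.Dict Char (List Int)) : List (Char × Int) :=
  L.flatMap (fun c => ((cnt.getD c []).reverse).map (fun j => (c, -j)))

lemma repC_congr {L : List Char} {d1 d2 : PySem.Dict Char (List Int)}
    (h : ∀ c ∈ L, d1.getD c [] = d2.getD c []) : repC L d1 = repC L d2 := by
  induction L with
  | nil => rfl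
  | cons a L ih =>
    simp only [repC, List.flatMap_cons] at *
    rw [h a (by simp), ih (fun c hc => h c (by simp [hc]))]

lemma mem_repC {L : List Char} {cnt : PySem.Dict Char (List Int)} {q : Char × Int}
    (h : q ∈ repC L cnt) : q.1 ∈ L ∧ -q.2 ∈ cnt.getD q.1 [] := by
  simp only [repC, List.mem_flatMap, List.mem_map] at h
  obtain ⟨c, hcL, j, hj, rfl⟩ := h
  refine ⟨hcL, ?_⟩
  simpa using List.mem_reverse.mp hj

lemma mem_repC_of {L : List Char} {cnt : PySem.Dict Char (List Int)} {c : Char} {j : Int}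
    (hc : c ∈ L) (hj : j ∈ cnt.getD c []) : (c, -j) ∈ repC L cnt := by
  simp only [repC, List.mem_flatMap, List.mem_map]
  exact ⟨c, hc, j, List.mem_reverse.mpr hj, rfl⟩

lemma insertS_skip {x : Char × Int} {l1 l2 : List (Char × Int)}
    (h : ∀ y ∈ l1, tupLt y x = true) : insertS x (l1 ++ l2) = l1 ++ insertS x l2 := by
  induction l1 with
  | nil => rfl
  | cons y ys ih =>
    simp only [List.cons_append, insertS, h y (by simp)]
    rw [ih (fun z hz => h z (by simp [hz]))]
    simp

lemma insertS_stop {x : Char × Int} {l : List (Char × Int)}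
    (h : ∀ y ∈ l, tupLt y x = false) : insertS x l = x :: l := by
  cases l with
  | nil => rfl
  | cons y ys => simp [insertS, h y (by simp)]

lemma mem_insertS {x q : Char × Int} {l : List (Char × Int)}
    (h : q ∈ insertS x l) : q = x ∨ q ∈ l := by
  induction l with
  | nil => simpa [insertS] using h
  | cons y ys ih =>
    simp only [insertS] at h
    split at h
    · rcases List.mem_cons.mp h with h1 | h1
      · exact Or.inr (by simp [h1])
      · rcases ih h1 with h2 | h2
        · exact Or.inl h2
        · exact Or.inr (by simp [h2])
    · rcases List.mem_cons.mp h with h1 | h1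
      · exact Or.inl h1
      · exact Or.inr h1

set_option maxRecDepth 8192 in
lemma mem_alpha {c : Char} (h1 : 97 ≤ c.toNat) (h2 : c.toNat ≤ 122) : c ∈ alphaList := by
  have hval : 97 ≤ c.toNat ∧ c.toNat ≤ 122 := by
    constructor
    · exact h1
    · exact h2
  have hmap : c.toNat ∈ alphaList.map Char.toNat := by
    have : alphaList.map Char.toNat =
        [97,98,99,100,101,102,103,104,105,106,107,108,109,110,111,112,113,114,
         115,116,117,118,119,120,121,122] := by decide
    rw [this]
    simp only [List.mem_cons, List.not_mem_nil, or_false]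
    omega
  obtain ⟨a, haL, ha⟩ := List.mem_map.mp hmap
  exact (Char.ext (UInt32.toNat_inj.mp ha)) ▸ haL

set_option maxRecDepth 8192 in
lemma alpha_sorted : alphaList.Pairwise (· < ·) := by decide

lemma alpha_nodup : alphaList.Nodup := alpha_sorted.nodup

lemma insert_rep {L : List Char} {c : Char} {i : Int} {cnt : PySem.Dict Char (List Int)}
    (hsort : L.Pairwise (· < ·)) (hc : c ∈ L)
    (hb : ∀ j ∈ cnt.getD c [], j < i) :
    insertS (c, -i) (repC L cnt) = repC L (cnt.insert c (cnt.getD c [] ++ [i])) := by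
  induction L with
  | nil => cases hc
  | cons c' L' ih =>
    rw [List.pairwise_cons] at hsort
    obtain ⟨hlt, hsort'⟩ := hsort
    rcases List.mem_cons.mp hc with rfl | hcL'
    · -- c is the head letter: insertion happens at the front of c's block
      have hstop : ∀ y ∈ ((cnt.getD c []).reverse).map (fun j => (c, -j)) ++ repC L' cnt,
          tupLt y (c, -i) = false := by
        intro y hy
        rcases List.mem_append.mp hy with hy | hy
        · obtain ⟨j, hj, rfl⟩ := List.mem_map.mp hy
          have hji := hb j (List.mem_reverse.mp hj)
          simp only [tupLt, Bool.or_eq_false_iff, Bool.and_eq_false_iff]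
          refine ⟨by simp, Or.inr (by simp; omega)⟩
        · have hm := mem_repC hy
          have hylt : c < y.1 := hlt y.1 hm.1
          simp only [tupLt, Bool.or_eq_false_iff, Bool.and_eq_false_iff]
          exact ⟨by simp [lt_asymm hylt], Or.inl (by simp [(ne_of_gt hylt)])⟩
      have hne : ∀ c'' ∈ L', cnt.getD c'' [] = (cnt.insert c (cnt.getD c [] ++ [i])).getD c'' [] := by
        intro c'' hc''
        rw [PySem.Dict.getD_insert]
        split
        · exact absurd (by assumption) (ne_of_gt (hlt c'' hc''))
        · rfl
      simp only [repC, List.flatMap_cons] at *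
      rw [insertS_stop hstop, PySem.Dict.getD_insert_self, List.reverse_append,
        List.reverse_cons, List.reverse_nil, List.nil_append, List.singleton_append,
        List.map_cons]
      exact congrArg _ (congrArg _ (repC_congr hne))
    · -- head letter c' < c: its whole block is skipped
      have hskip : ∀ y ∈ ((cnt.getD c' []).reverse).map (fun j => (c', -j)),
          tupLt y (c, -i) = true := by
        intro y hy
        obtain ⟨j, hj, rfl⟩ := List.mem_map.mp hy
        simp [tupLt, hlt c hcL']
      have hne : c' ≠ c := ne_of_lt (hlt c hcL')
      simp only [repC, List.flatMap_cons] at *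
      rw [insertS_skip hskip, ih hsort' hcL', PySem.Dict.getD_insert]
      split
      · exact absurd (by assumption) hne
      · rfl

lemma innerA_getD_not_mem (L : List Char) (cnt : PySem.Dict Char (List Int))
    (ans : List Char) {c : Char} (hc : c ∉ L) :
    (innerA L cnt ans).1.getD c [] = cnt.getD c [] := by
  induction L generalizing cnt ans with
  | nil => rfl
  | cons c' L' ih =>
    have hne : c ≠ c' := fun h => hc (h ▸ List.mem_cons_self)
    rcases hdq : cnt.getD c' [] with _ | ⟨j, js⟩
    · simp only [innerA, hdq]
      exact ih _ _ (fun h => hc (List.mem_cons_of_mem _ h))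
    · simp only [innerA, hdq]
      rw [PySem.Dict.getD_insert]
      split
      · exact absurd (by assumption) hne
      · rfl

lemma inner_sim (L : List Char) (cnt : PySem.Dict Char (List Int)) (ans : List Char)
    (hnd : L.Nodup) :
    (repC L cnt = [] → innerA L cnt ans = (cnt, ans)) ∧
    (∀ q rest, repC L cnt = q :: rest →
      (innerA L cnt ans).2 = pySet ans (-q.2) '*' ∧
      repC L (innerA L cnt ans).1 = rest) := by
  induction L with
  | nil =>
    refine ⟨fun _ => rfl, fun q rest h => ?_⟩
    simp [repC] at h
  | cons c L' ih =>
    rw [List.nodup_cons] at hnd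
    obtain ⟨hcL', hnd'⟩ := hnd
    rcases hdq : cnt.getD c [] with _ | ⟨j, js⟩
    · have hrep : repC (c :: L') cnt = repC L' cnt := by
        simp [repC, List.flatMap_cons, hdq]
      have hA : innerA (c :: L') cnt ans = innerA L' cnt ans := by
        simp [innerA, hdq]
      have hblk : ∀ (d : PySem.Dict Char (List Int)), d.getD c [] = [] →
          repC (c :: L') d = repC L' d := by
        intro d hd; simp [repC, List.flatMap_cons, hd]
      constructor
      · intro h
        rw [hA]
        exact (ih hnd').1 (by rw [← hblk cnt hdq]; exact h)
      · intro q rest h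
        rw [hblk cnt hdq] at h
        have := (ih hnd').2 q rest h
        rw [hA]
        refine ⟨this.1, ?_⟩
        rw [hblk _ ?hg]
        · exact this.2
        · rw [innerA_getD_not_mem L' cnt ans hcL']
          exact hdq
    · have hrev : (j :: js).reverse
          = (j :: js).getLast (List.cons_ne_nil j js) :: (j :: js).dropLast.reverse := by
        conv_lhs => rw [← List.dropLast_append_getLast (List.cons_ne_nil j js)]
        rw [List.reverse_append]
        rfl
      have hrep : repC (c :: L') cnt
          = (c, -((j :: js).getLast (List.cons_ne_nil j js)))
            :: ((((j :: js).dropLast).reverse).map (fun j => (c, -j)) ++ repC L' cnt) := by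
        simp only [repC, List.flatMap_cons, hdq, hrev, List.map_cons, List.cons_append]
      have hA : innerA (c :: L') cnt ans
          = (cnt.insert c ((j :: js).dropLast),
             pySet ans ((j :: js).getLast (List.cons_ne_nil j js)) '*') := by
        simp [innerA, hdq]
      constructor
      · intro h; rw [hrep] at h; exact absurd h (List.cons_ne_nil _ _)
      · intro q rest h
        rw [hrep] at h
        obtain ⟨rfl, rfl⟩ : q = (c, -((j :: js).getLast (List.cons_ne_nil j js)))
            ∧ rest = (((j :: js).dropLast).reverse).map (fun j => (c, -j)) ++ repC L' cnt := by
          exact ⟨((List.cons.injEq _ _ _ _ ▸ h).1).symm, ((List.cons.injEq _ _ _ _ ▸ h).2).symm⟩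
        rw [hA]
        refine ⟨by simp, ?_⟩
        simp only [repC, List.flatMap_cons, PySem.Dict.getD_insert_self]
        refine congrArg _ ?_
        refine repC_congr (fun c'' hc'' => ?_)
        rw [PySem.Dict.getD_insert]
        split
        · next heq => exact absurd (heq ▸ hc'') hcL'
        · rfl

lemma fold_sim (ps : List (Int × Char)) :
    ∀ (cnt : PySem.Dict Char (List Int)) (avail : List (Char × Int)) (ans : List Char),
    avail = repC alphaList cnt →
    (∀ p ∈ ps, p.2 = '*' ∨ (97 ≤ p.2.toNat ∧ p.2.toNat ≤ 122)) →
    ps.Pairwise (fun p q => p.1 < q.1) →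
    (∀ q ∈ avail, ∀ p ∈ ps, -p.1 < q.2) →
    (ps.foldl stepA (cnt, ans)).2 = (ps.foldl stepB (avail, ans)).2 := by
  induction ps with
  | nil => intros; rfl
  | cons p ps' ih =>
    intro cnt avail ans hav hpre hpw hb
    rw [List.pairwise_cons] at hpw
    obtain ⟨hplt, hpw'⟩ := hpw
    by_cases hstar : p.2 = '*'
    · simp only [List.foldl_cons, stepA, stepB, hstar, if_pos]
      cases havail : avail with
      | nil =>
        have hrep0 : repC alphaList cnt = [] := by rw [← hav, havail]
        rw [(inner_sim alphaList cnt ans alpha_nodup).1 hrep0]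
        exact ih cnt [] ans (havail ▸ hav)
          (fun q hq => hpre q (by simp [hq])) hpw' (by simp)
      | cons q rest =>
        have hrep : repC alphaList cnt = q :: rest := by rw [← hav, havail]
        have hi := (inner_sim alphaList cnt ans alpha_nodup).2 q rest hrep
        have hb' : ∀ q' ∈ rest, ∀ p' ∈ ps', -p'.1 < q'.2 := by
          intro q' hq' p' hp'
          exact hb q' (by rw [havail]; exact List.mem_cons_of_mem _ hq') p'
            (List.mem_cons_of_mem _ hp')
        have := ih (innerA alphaList cnt ans).1 rest ((innerA alphaList cnt ans).2)
          hi.2.symm (fun q hq => hpre q (by simp [hq])) hpw' hb'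
        rw [Prod.mk.eta] at this
        rw [hi.1] at this
        exact this
    · simp only [List.foldl_cons, stepA, stepB, if_neg hstar]
      rcases hpre p (by simp) with h | h
      · exact absurd h hstar
      obtain ⟨h97, h122⟩ := h
      have hmem := mem_alpha h97 h122
      have hbc : ∀ j ∈ cnt.getD p.2 [], j < p.1 := by
        intro j hj
        have := hb (p.2, -j) (hav ▸ mem_repC_of hmem hj) p (by simp)
        omega
      have hins := insert_rep alpha_sorted hmem hbc
      refine ih _ _ _ (by rw [hav, hins]) (fun q hq => hpre q (by simp [hq])) hpw' ?_
      intro q hq p' hp'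
      rcases mem_insertS hq with rfl | hq'
      · have := hplt p' hp'
        simpa using this
      · exact hb q hq' p' (List.mem_cons_of_mem _ hp')

set_option maxRecDepth 8192 in
lemma cnt0_getD (c : Char) :
    (alphaList.foldl (fun d c => d.insert c ([] : List Int)) PySem.Dict.empty).getD c [] = [] := by
  have gen : ∀ (L : List Char) (d : PySem.Dict Char (List Int)),
      (∀ x, d.getD x [] = []) →
      ∀ x, (L.foldl (fun d c => d.insert c ([] : List Int)) d).getD x [] = [] := by
    intro L
    induction L with
    | nil => intro d hd x; exact hd x
    | cons a L ih =>
      intro d hd x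
      refine ih _ (fun y => ?_) x
      rw [PySem.Dict.getD_insert]
      split <;> simp [hd]
  exact gen alphaList PySem.Dict.empty (fun x => by simp [pysem]) c

-- ===== VERDICT (by name: the statement is the Claim_ definition above) =====
theorem clearStars_spec : Claim_equal_clearStars := by
  unfold Claim_equal_clearStars
  intro s _ hpre
  unfold Spec_clearStars clearStars clearStars_alt
  rw [Pre_clearStars, List.all_eq_true] at hpre
  have hpre' : ∀ p ∈ PySem.List.enumerate s.toList,
      p.2 = '*' ∨ (97 ≤ p.2.toNat ∧ p.2.toNat ≤ 122) := by
    intro p hp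
    have hmem : p.2 ∈ s.toList := by
      have : p.2 ∈ (PySem.List.enumerate s.toList).map (·.2) := List.mem_map_of_mem hp
      rwa [PySem.List.map_snd_enumerate] at this
    have := hpre p.2 hmem
    simp only [pvLowerOrStar, Bool.or_eq_true, Bool.and_eq_true, beq_iff_eq,
      decide_eq_true_eq] at this
    exact this
  have hrel : ([] : List (Char × Int))
      = repC alphaList (alphaList.foldl (fun d c => d.insert c ([] : List Int)) PySem.Dict.empty) := by
    simp [repC, cnt0_getD]
  have h := fold_sim (PySem.List.enumerate s.toList)
    (alphaList.foldl (fun d c => d.insert c ([] : List Int)) PySem.Dict.empty)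
    [] s.toList hrel hpre' (PySem.List.pairwise_lt_enumerate _ _) (by simp)
  simp only at h ⊢
  rw [h]

set_option maxRecDepth 100000 in
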